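-- pv_equiv track=rewrite | github.com/SweeetDozer/LifeAfterLife_core | app/services/kinship_service.py | _sibling_lineage_counts
-- ===== SOURCE A (Python) =====
-- def _sibling_lineage_counts(sequence):
--     if sequence.count("sibling") != 1:
--         return None
--
--     sibling_index = sequence.index("sibling")
--     if any(step != "parent" for step in sequence[:sibling_index]):
--         return None
--     if any(step != "child" for step in sequence[sibling_index + 1 :]):
--         return None
--
--     return sibling_index + 1, len(sequence) - sibling_index
-- ===== SOURCE B (Python) =====
-- def _sibling_lineage_counts(sequence):
--     parents = 0
--     children = 0
--     seen_sibling = False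
--     for step in sequence:
--         if not seen_sibling:
--             if step == "sibling":
--                 seen_sibling = True
--             elif step == "parent":
--                 parents += 1
--             else:
--                 return None
--         else:
--             if step == "child":
--                 children += 1
--             else:
--                 return None
--     if not seen_sibling:
--         return None
--     return parents + 1, children + 1
-- ===== Notes on version B (the rewrite author's own statement) =====
-- stated objective: alternative
-- what changed: Replaced A's four separate scans (count, index, prefix check, suffix check) by a single forward state-machine pass keeping a phase flag and two counters; same O(n) cost, different traversal structure.
import Mathlib
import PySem

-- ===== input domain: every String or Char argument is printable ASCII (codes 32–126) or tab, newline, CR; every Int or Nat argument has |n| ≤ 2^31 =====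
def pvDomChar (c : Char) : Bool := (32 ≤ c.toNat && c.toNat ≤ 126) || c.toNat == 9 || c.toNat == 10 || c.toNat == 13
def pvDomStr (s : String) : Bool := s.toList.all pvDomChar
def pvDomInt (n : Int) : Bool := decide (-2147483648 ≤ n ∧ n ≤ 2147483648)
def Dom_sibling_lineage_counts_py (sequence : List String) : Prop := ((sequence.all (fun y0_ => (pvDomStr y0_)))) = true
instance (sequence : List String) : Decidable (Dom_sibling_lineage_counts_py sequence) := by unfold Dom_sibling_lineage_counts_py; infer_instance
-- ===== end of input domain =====

-- B replaces A's four separate scans by one forward state-machine pass (phase flag + two counters).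


-- ===== PORT A =====
def sibling_lineage_counts_py (sequence : List String) : Option (Int × Int) :=
  if PySem.List.count sequence "sibling" ≠ 1 then none
  else
    match PySem.List.index? sequence "sibling" with
    | none => none   -- unreachable: count = 1 means "sibling" ∈ sequence
    | some sibling_index =>
      if (PySem.List.slice sequence none (some (sibling_index : Int))).any
           (fun step => step != "parent") then none
      else if (PySem.List.slice sequence (some ((sibling_index : Int) + 1)) none).any
           (fun step => step != "child") then none
      else some ((sibling_index : Int) + 1, (sequence.length : Int) - (sibling_index : Int))

-- ===== PORT B =====
-- phase 'after sibling': count children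
def pvAfterSibling (xs : List String) (parents children : Int) : Option (Int × Int) :=
  match xs with
  | [] => some (parents + 1, children + 1)
  | step :: rest =>
    if step == "child" then pvAfterSibling rest parents (children + 1) else none

-- phase 'before sibling': count parents
def pvBeforeSibling (xs : List String) (parents : Int) : Option (Int × Int) :=
  match xs with
  | [] => none
  | step :: rest =>
    if step == "sibling" then pvAfterSibling rest parents 0
    else if step == "parent" then pvBeforeSibling rest (parents + 1)
    else none

def sibling_lineage_counts_py_alt (sequence : List String) : Option (Int × Int) :=
  pvBeforeSibling sequence 0

-- ===== PRECONDITION & SPEC =====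
def Spec_sibling_lineage_counts_py (sequence : List String) (out : Option (Int × Int)) : Prop := out = sibling_lineage_counts_py_alt sequence
instance (sequence : List String) (out : Option (Int × Int)) : Decidable (Spec_sibling_lineage_counts_py sequence out) := by unfold Spec_sibling_lineage_counts_py; infer_instance

-- ===== CLAIM (what is proved, stated in full; the proofs are below) =====
def Claim_equal_sibling_lineage_counts_py : Prop := ∀ (sequence : List String), Dom_sibling_lineage_counts_py sequence → Spec_sibling_lineage_counts_py sequence (sibling_lineage_counts_py sequence)

-- ===== LEMMAS AND PROOFS =====

-- proof-only intermediate characterization of A's result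
def pvASpec (xs : List String) : Option (Int × Int) :=
  match PySem.List.index? xs "sibling" with
  | none => none
  | some i =>
    if (xs.take i).all (fun s => s == "parent") && (xs.drop (i + 1)).all (fun s => s == "child")
    then some ((i : Int) + 1, (xs.length : Int) - (i : Int)) else none

theorem pvA_eq_aSpec (xs : List String) : sibling_lineage_counts_py xs = pvASpec xs := by
  unfold sibling_lineage_counts_py pvASpec
  cases h : PySem.List.index? xs "sibling" with
  | none =>
    have hmem : "sibling" ∉ xs := (PySem.List.index?_eq_none_iff _ _).mp h
    simp [PySem.List.count_eq, List.count_eq_zero_of_not_mem hmem]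
  | some i =>
    obtain ⟨pre, suf, hxs, hlen, hpre⟩ := (PySem.List.index?_eq_some_iff _ _ _).mp h
    have htake : xs.take i = pre := by
      rw [hxs, ← hlen]; simp
    have hdrop : xs.drop (i + 1) = suf := by
      rw [hxs, ← hlen]; simp
    have hcount : PySem.List.count xs "sibling" = 1 + List.count "sibling" suf := by
      rw [hxs]
      simp [PySem.List.count_eq, List.count_eq_zero_of_not_mem hpre]
      omega
    have hslice1 : PySem.List.slice xs none (some (i : Int)) = pre := by
      rw [PySem.List.slice_to_natCast, htake]
    have hslice2 : PySem.List.slice xs (some ((i : Int) + 1)) none = suf := by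
      have : ((i : Int) + 1) = ((i + 1 : Nat) : Int) := by push_cast; ring
      rw [this, PySem.List.slice_from_natCast, hdrop]
    simp only [hslice1, hslice2, htake, hdrop]
    by_cases hc : PySem.List.count xs "sibling" ≠ 1
    · rw [if_pos hc]
      have hsib : "sibling" ∈ suf := by
        rw [hcount] at hc
        exact List.count_pos_iff.mp (by omega)
      have hfalse : suf.all (fun s => s == "child") = false := by
        rw [List.all_eq_false]
        exact ⟨"sibling", hsib, by simp⟩
      simp [hfalse]
    · rw [if_neg hc]
      rcases hA : pre.any (fun step => step != "parent") with _ | _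
      · rcases hB : suf.any (fun step => step != "child") with _ | _
        · simp only [List.any_eq_false] at hA hB
          have h1 : pre.all (fun s => s == "parent") = true := by
            rw [List.all_eq_true]
            intro s hm
            simpa using hA s hm
          have h2 : suf.all (fun s => s == "child") = true := by
            rw [List.all_eq_true]
            intro s hm
            simpa using hB s hm
          simp [h1, h2]
        · have h2 : suf.all (fun s => s == "child") = false := by
            rcases List.any_eq_true.mp hB with ⟨s, hm, hne⟩
            exact List.all_eq_false.mpr ⟨s, hm, by simpa using hne⟩
          simp [h2]
      · have h1 : pre.all (fun s => s == "parent") = false := by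
          rcases List.any_eq_true.mp hA with ⟨s, hm, hne⟩
          exact List.all_eq_false.mpr ⟨s, hm, by simpa using hne⟩
        simp [h1]

theorem pvAfterSibling_char (xs : List String) (p c : Int) :
    pvAfterSibling xs p c =
      if xs.all (fun s => s == "child") then some (p + 1, c + (xs.length : Int) + 1) else none := by
  induction xs generalizing c with
  | nil => simp [pvAfterSibling]
  | cons x r ih =>
    by_cases hx : x = "child"
    · subst hx
      rw [pvAfterSibling, if_pos (by simp), ih]
      by_cases hall : r.all (fun s => s == "child") = true
      · simp only [hall, List.all_cons, beq_self_eq_true, Bool.true_and, if_true,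
          List.length_cons]
        simp only [Option.some.injEq, Prod.mk.injEq]
        push_cast
        exact ⟨by simp, by ring⟩
      · simp [hall]
    · rw [pvAfterSibling, if_neg (by simp [hx])]
      have : (((x :: r).all (fun s => s == "child")) = false) := by
        simp [hx]
      simp [this]

theorem pvBeforeSibling_shift (xs : List String) (p : Int) :
    pvBeforeSibling xs p = (pvASpec xs).map (fun pr => (pr.1 + p, pr.2)) := by
  induction xs generalizing p with
  | nil => simp [pvBeforeSibling, pvASpec, PySem.List.index?_eq_idxOf?]
  | cons x r ih =>
    by_cases hs : x = "sibling"
    · subst hs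
      rw [pvBeforeSibling, if_pos (by simp), pvAfterSibling_char]
      unfold pvASpec
      rw [PySem.List.index?_cons_self]
      simp only [List.take_zero, List.drop_succ_cons, List.drop_zero, List.all_nil,
        Bool.true_and, Nat.cast_zero, List.length_cons]
      by_cases hall : r.all (fun s => s == "child") = true
      · simp only [hall, if_true, Option.map_some]
        simp only [Option.some.injEq, Prod.mk.injEq]
        push_cast
        constructor <;> ring
      · simp [hall]
    · have hB : pvBeforeSibling (x :: r) p =
          (if x = "parent" then pvBeforeSibling r (p + 1) else none) := by
        rw [pvBeforeSibling, if_neg (by simp [hs])]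
        by_cases h : x = "parent" <;> simp [h]
      unfold pvASpec
      rw [PySem.List.index?_cons_of_ne (x := x) (v := "sibling") r hs]
      cases hidx : PySem.List.index? r "sibling" with
      | none =>
        rw [hB]
        have hr : pvASpec r = none := by unfold pvASpec; rw [hidx]
        split_ifs with h
        · rw [ih, hr]; rfl
        · rfl
      | some i =>
        simp only [Option.map_some, List.take_succ_cons, List.drop_succ_cons, List.all_cons]
        rw [hB]
        by_cases hp : x = "parent"
        · subst hp
          rw [if_pos rfl, ih]
          unfold pvASpec
          rw [hidx]
          simp only [beq_self_eq_true, Bool.true_and]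
          by_cases hcond : ((r.take i).all (fun s => s == "parent") &&
              (r.drop (i + 1)).all (fun s => s == "child")) = true
          · simp only [hcond, if_true, Option.map_some, List.length_cons]
            simp only [Option.some.injEq, Prod.mk.injEq]
            push_cast
            constructor <;> ring
          · rw [if_neg hcond, if_neg hcond]
            rfl
        · rw [if_neg hp]
          have : ((x == "parent") : Bool) = false := by simp [hp]
          simp [this]

-- ===== VERDICT (by name: the statement is the Claim_ definition above) =====
theorem sibling_lineage_counts_py_spec : Claim_equal_sibling_lineage_counts_py := by
  intro sequence _
  unfold Spec_sibling_lineage_counts_py sibling_lineage_counts_py_alt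
  rw [pvBeforeSibling_shift, pvA_eq_aSpec]
  cases pvASpec sequence with
  | none => rfl
  | some pr => simp
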